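-- pv_equiv track=rewrite | github.com/jichenqing/search-engine | information_retrieval.py | cal_position
-- ===== SOURCE A (Python) =====
-- from collections import defaultdict
--
-- def substract_lists(a, b):
--     count = 0
--     for i in a:
--         for j in b:
--             if abs(i-j) == 1:
--                 count += 1
--     return count
--
-- def cal_position(position_dict, query_length):
--     position_dict_new = defaultdict(int)
--     for i in position_dict:
--         position_list = position_dict[i]
--         if len(position_list) < query_length:
--             position_dict[i] = 0
--         else:
--             position_list = sorted(position_list, key=lambda x: len(x))
--             for j in range(query_length-1):
--                 position_dict_new[i] += substract_lists(position_list[j], position_list[j+1])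
--
--             #position_list = tuple(position_list)
--             #position_dict_new[i] = substract_lists(*position_list)
--
--     return position_dict_new
-- ===== SOURCE B (Python) =====
-- def count_shift(a, b, d):
--     # a and b sorted ascending; count pairs (x, y), x in a, y in b, with x == y + d,
--     # by a two-pointer merge that multiplies run lengths of equal values.
--     i = j = total = 0
--     n, m = len(a), len(b)
--     while i < n and j < m:
--         y = b[j] + d
--         if a[i] < y:
--             i += 1
--         elif a[i] > y:
--             j += 1
--         else:
--             v = a[i]
--             ri = i
--             while ri < n and a[ri] == v:
--                 ri += 1
--             rj = j
--             while rj < m and b[rj] + d == v: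
--                 rj += 1
--             total += (ri - i) * (rj - j)
--             i, j = ri, rj
--     return total
--
-- def cal_position(position_dict, query_length):
--     result = {}
--     for key, plist in position_dict.items():
--         if query_length >= 2 and len(plist) >= query_length:
--             lists = sorted(plist, key=len)
--             prev = sorted(lists[0])
--             total = 0
--             for j in range(1, query_length):
--                 cur = sorted(lists[j])
--                 total += count_shift(prev, cur, 1) + count_shift(prev, cur, -1)
--                 prev = cur
--             result[key] = total
--     return result
-- ===== Notes on version B (the rewrite author's own statement) =====
-- stated objective: alternative
-- what changed: Per adjacent pair of posting lists B sorts both lists numerically and counts pairs at distance 1 with a two-pointer merge over runs of equal values (sort-then-merge), instead of A's nested two-loop scan over all element pairs; B keeps the previous sorted list across the adjacent-pair loop and does not mutate the input dict (return value unchanged).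
import Mathlib
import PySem

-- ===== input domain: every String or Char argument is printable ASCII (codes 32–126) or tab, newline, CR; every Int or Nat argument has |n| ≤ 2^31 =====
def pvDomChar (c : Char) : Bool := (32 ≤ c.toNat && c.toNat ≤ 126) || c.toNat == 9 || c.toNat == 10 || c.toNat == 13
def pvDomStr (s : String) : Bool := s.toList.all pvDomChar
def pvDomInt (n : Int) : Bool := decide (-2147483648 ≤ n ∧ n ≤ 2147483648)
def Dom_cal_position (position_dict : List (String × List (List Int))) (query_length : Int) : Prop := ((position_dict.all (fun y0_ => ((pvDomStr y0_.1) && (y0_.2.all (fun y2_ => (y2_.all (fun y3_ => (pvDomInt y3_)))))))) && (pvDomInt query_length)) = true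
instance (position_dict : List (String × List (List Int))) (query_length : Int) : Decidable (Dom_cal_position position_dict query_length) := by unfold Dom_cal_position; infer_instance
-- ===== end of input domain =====

-- B sorts each posting list numerically and counts distance-1 pairs of adjacent lists by a
-- two-pointer merge over runs of equal values, instead of A's nested two-loop scan over all
-- element pairs. A mutates position_dict in place (sets short entries to 0); B does not —
-- the claim is about the RETURN value only.

-- ===== PORT A =====
-- helper substract_lists: nested loops counting |i-j| == 1
def substractLists (a b : List Int) : Int :=
  a.foldl (fun count i =>
    b.foldl (fun count j => if (i - j).natAbs = 1 then count + 1 else count) count) 0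

def cal_position (position_dict : List (String × List (List Int))) (query_length : Int) : List (String × Int) :=
  let d : PySem.Dict String (List (List Int)) := PySem.Dict.ofList position_dict
  let new : PySem.Dict String Int :=
    d.keys.foldl (fun acc i =>
      let position_list := d.getD i []
      if (position_list.length : Int) < query_length then
        acc  -- Python sets position_dict[i] = 0 here: mutation of the argument only, return value unaffected
      else
        let sorted := PySem.List.sorted position_list (fun x => (x.length : Int)) false
        (PySem.List.pyRange 0 (query_length - 1) 1).foldl (fun acc j =>
          acc.modify i 0 (· + substractLists (PySem.List.pyGetD sorted j [])
                               (PySem.List.pyGetD sorted (j + 1) []))) acc)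
      PySem.Dict.empty
  new.items

-- ===== PORT B =====
-- takeRun v l: the inner 'while r < n and l[r] == v: r += 1' loops of count_shift — the
-- length of the leading run of v's and the remaining suffix (index r ↔ that suffix)
def takeRun (v : Int) : List Int → Nat × List Int
  | [] => (0, [])
  | x :: t => if x = v then ((takeRun v t).1 + 1, (takeRun v t).2) else (0, x :: t)

lemma takeRun_len_le (v : Int) : ∀ (l : List Int), (takeRun v l).2.length ≤ l.length := by
  intro l
  induction l with
  | nil => simp [takeRun]
  | cons x t ih =>
    by_cases h : x = v
    · simp [takeRun, h]; omega
    · simp [takeRun, h]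

-- count_shift's outer while loop: two pointers i, j represented by the remaining suffixes
def countShift (d : Int) : List Int → List Int → Int
  | [], _ => 0
  | _ :: _, [] => 0
  | x :: a', y :: b' =>
    if x < y + d then countShift d a' (y :: b')
    else if y + d < x then countShift d (x :: a') b'
    else
      (((takeRun x (x :: a')).1 : Int) * ((takeRun y (y :: b')).1 : Int)) +
        countShift d (takeRun x (x :: a')).2 (takeRun y (y :: b')).2
termination_by a b => a.length + b.length
decreasing_by
  all_goals simp [takeRun]
  all_goals
    (have h1 := takeRun_len_le x a'
     have h2 := takeRun_len_le y b'
     omega)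

def cal_position_alt (position_dict : List (String × List (List Int))) (query_length : Int) : List (String × Int) :=
  let result : PySem.Dict String Int :=
    (PySem.Dict.ofList position_dict).items.foldl (fun acc kv =>
      if 2 ≤ query_length ∧ query_length ≤ (kv.2.length : Int) then
        let lists := PySem.List.sorted kv.2 (fun x => (x.length : Int)) false
        let st := (PySem.List.pyRange 1 query_length 1).foldl
          (fun (st : Int × List Int) j =>
            let cur := PySem.List.sorted (PySem.List.pyGetD lists j []) (fun x => x) false
            (st.1 + countShift 1 st.2 cur + countShift (-1) st.2 cur, cur))
          (0, PySem.List.sorted (PySem.List.pyGetD lists 0 []) (fun x => x) false)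
        acc.insert kv.1 st.1
      else acc) PySem.Dict.empty
  result.items

-- ===== PRECONDITION & SPEC =====
def Spec_cal_position (position_dict : List (String × List (List Int))) (query_length : Int) (out : List (String × Int)) : Prop := out = cal_position_alt position_dict query_length
instance (position_dict : List (String × List (List Int))) (query_length : Int) (out : List (String × Int)) : Decidable (Spec_cal_position position_dict query_length out) := by unfold Spec_cal_position; infer_instance

-- ===== CLAIM (what is proved, stated in full; the proofs are below) =====
def Claim_equal_cal_position : Prop := ∀ (position_dict : List (String × List (List Int))) (query_length : Int), Dom_cal_position position_dict query_length → Spec_cal_position position_dict query_length (cal_position position_dict query_length)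

-- ===== LEMMAS AND PROOFS =====

-- the inner loop of substract_lists counts the occurrences of i-1 and i+1 in b
lemma inner_count (i : Int) : ∀ (b : List Int) (c : Int),
    b.foldl (fun c j => if (i - j).natAbs = 1 then c + 1 else c) c
      = c + (b.count (i-1) + b.count (i+1)) := by
  intro b
  induction b with
  | nil => simp
  | cons j t ih =>
    intro c
    simp only [List.foldl_cons, List.count_cons, ih]
    by_cases h1 : j = i - 1
    · have h : (i - j).natAbs = 1 := by omega
      simp [h1]; omega
    · by_cases h2 : j = i + 1
      · have h : (i - j).natAbs = 1 := by omega
        simp [h2]; omega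
      · have hno : ¬ (i - j).natAbs = 1 := by omega
        simp [hno, h1, h2]

-- substract_lists as a sum over its first argument
lemma sub_eq_sum (a b : List Int) :
    substractLists a b = (a.map (fun x => ((b.count (x-1) : Int) + (b.count (x+1) : Int)))).sum := by
  unfold substractLists
  have h : a.foldl (fun count i =>
      b.foldl (fun c j => if (i - j).natAbs = 1 then c + 1 else c) count) 0
      = a.foldl (fun count x => count + ((b.count (x-1) : Int) + (b.count (x+1) : Int))) 0 := by
    apply PySem.List.foldl_congr_mem
    intro acc x _
    rw [inner_count]
  rw [h, PySem.List.foldl_add]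
  simp

-- takeRun splits off exactly the leading run of v's
lemma takeRun_split (v : Int) : ∀ (l : List Int),
    l = List.replicate (takeRun v l).1 v ++ (takeRun v l).2 := by
  intro l
  induction l with
  | nil => simp [takeRun]
  | cons x t ih =>
    by_cases h : x = v
    · simp only [takeRun, if_pos h, List.replicate_succ, List.cons_append]
      rw [h]
      exact congrArg (v :: ·) ih
    · simp [takeRun, h]

lemma takeRun_rest_head (v : Int) : ∀ (l : List Int),
    (takeRun v l).2 = [] ∨ ∃ w t, (takeRun v l).2 = w :: t ∧ w ≠ v := by
  intro l
  induction l with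
  | nil => simp [takeRun]
  | cons x t ih =>
    by_cases h : x = v
    · simpa [takeRun, h] using ih
    · exact Or.inr ⟨x, t, by simp [takeRun, h], h⟩

-- on a sorted list starting with v: the run length is the full count of v,
-- and everything in the rest is strictly greater than v
lemma takeRun_sorted (v : Int) (l : List Int) (hs : l.Pairwise (· ≤ ·))
    (hh : ∀ z ∈ l, v ≤ z) :
    (takeRun v l).1 = l.count v ∧ (∀ z ∈ (takeRun v l).2, v < z) ∧
      (takeRun v l).2.Pairwise (· ≤ ·) := by
  have hsplit := takeRun_split v l
  have hrest : ∀ z ∈ (takeRun v l).2, v < z := by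
    rcases takeRun_rest_head v l with he | ⟨w, t, hwt, hw⟩
    · simp [he]
    · intro z hz
      rw [hwt] at hz hsplit
      have hzl : z ∈ l := by rw [hsplit]; simp at hz ⊢; tauto
      have hvz : v ≤ z := hh z hzl
      rcases List.mem_cons.mp hz with rfl | hzt
      · omega
      · -- w ≤ z from Pairwise on l (w precedes z)
        have hwl : l.Pairwise (· ≤ ·) := hs
        rw [hsplit] at hwl
        have := (List.pairwise_append.mp hwl).2.1
        have hwz : w ≤ z := (List.pairwise_cons.mp this).1 z hzt
        have hvw : v ≤ w := hh w (by rw [hsplit]; simp)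
        omega
  refine ⟨?_, hrest, ?_⟩
  · conv_rhs => rw [hsplit]
    rw [List.count_append, List.count_replicate]
    have : (takeRun v l).2.count v = 0 := by
      rw [List.count_eq_zero]
      intro hmem
      exact absurd (hrest v hmem) (lt_irrefl v)
    simp [this]
  · have := hs
    rw [hsplit] at this
    exact (List.pairwise_append.mp this).2.1

-- the two-pointer merge counts, for each x in a, the occurrences of x - d in b
lemma countShift_eq (d : Int) : ∀ (a b : List Int), a.Pairwise (· ≤ ·) → b.Pairwise (· ≤ ·) →
    countShift d a b = (a.map (fun x => ((b.count (x - d) : Nat) : Int))).sum := by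
  intro a b
  induction a, b using countShift.induct d with
  | case1 b =>
    intro _ _; simp [countShift]
  | case2 x a' =>
    intro _ _; simp [countShift, List.count_nil]
  | case3 x a' y b' hlt ih =>
    intro ha hb
    rw [countShift, if_pos hlt, ih (List.Pairwise.of_cons ha) hb]
    have hcount : (y :: b').count (x - d) = 0 := by
      rw [List.count_eq_zero]
      intro hmem
      have : ∀ z ∈ y :: b', y ≤ z := by
        intro z hz
        rcases List.mem_cons.mp hz with rfl | hz'
        · omega
        · exact (List.pairwise_cons.mp hb).1 z hz'
      have := this _ hmem
      omega
    simp [hcount]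
  | case4 x a' y b' hnlt hgt ih =>
    intro ha hb
    rw [countShift, if_neg hnlt, if_pos hgt, ih ha (List.Pairwise.of_cons hb)]
    congr 1
    apply List.map_congr_left
    intro z hz
    have hxz : x ≤ z := by
      rcases List.mem_cons.mp hz with rfl | hz'
      · omega
      · exact (List.pairwise_cons.mp ha).1 z hz'
    have hne : z - d ≠ y := by omega
    have hne2 : ¬ (y = z - d) := by omega
    simp [hne2]
  | case5 x a' y b' hnlt hngt ih =>
    intro ha hb
    have heq : x = y + d := by omega
    have hha : ∀ z ∈ x :: a', x ≤ z := by
      intro z hz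
      rcases List.mem_cons.mp hz with rfl | hz'
      · omega
      · exact (List.pairwise_cons.mp ha).1 z hz'
    have hhb : ∀ z ∈ y :: b', y ≤ z := by
      intro z hz
      rcases List.mem_cons.mp hz with rfl | hz'
      · omega
      · exact (List.pairwise_cons.mp hb).1 z hz'
    obtain ⟨hca, hra, hpa⟩ := takeRun_sorted x (x :: a') ha hha
    obtain ⟨hcb, hrb, hpb⟩ := takeRun_sorted y (y :: b') hb hhb
    -- decompose the sum over a along the run split
    have hsa := takeRun_split x (x :: a')
    have hsum : ((x :: a').map (fun z => (((y :: b').count (z - d) : Nat) : Int))).sum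
        = ((takeRun x (x :: a')).1 : Int) * ((takeRun y (y :: b')).1 : Int)
          + (((takeRun x (x :: a')).2).map (fun z => (((takeRun y (y :: b')).2.count (z - d) : Nat) : Int))).sum := by
      conv_lhs => rw [hsa]
      rw [List.map_append, List.sum_append, List.map_replicate, List.sum_replicate]
      have hx : (((y :: b').count (x - d) : Nat) : Int) = ((takeRun y (y :: b')).1 : Int) := by
        rw [show x - d = y by omega, hcb]
      have hmap : ((takeRun x (x :: a')).2).map (fun z => (((y :: b').count (z - d) : Nat) : Int))
          = ((takeRun x (x :: a')).2).map (fun z => (((takeRun y (y :: b')).2.count (z - d) : Nat) : Int)) := by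
        apply List.map_congr_left
        intro z hz
        have hxz : x < z := hra z hz
        have hzy : ¬ (z - d = y) := by omega
        have hzy' : ¬ (y = z - d) := by omega
        conv_lhs => rw [takeRun_split y (y :: b')]
        simp [List.count_append, List.count_replicate, hzy']
      rw [hmap, nsmul_eq_mul, hx]
    rw [countShift, if_neg hnlt, if_neg hngt, ih hpa hpb, hsum]

-- both directed merges together count the distance-1 pairs of the ORIGINAL lists
lemma pair_merge_eq (a b : List Int) :
    countShift 1 (PySem.List.sorted a (fun x => x) false) (PySem.List.sorted b (fun x => x) false)
      + countShift (-1) (PySem.List.sorted a (fun x => x) false) (PySem.List.sorted b (fun x => x) false)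
      = substractLists a b := by
  have hpa : (PySem.List.sorted a (fun x => x) false).Pairwise (· ≤ ·) := by
    simpa using PySem.List.sorted_pairwise a (fun x => x)
  have hpb : (PySem.List.sorted b (fun x => x) false).Pairwise (· ≤ ·) := by
    simpa using PySem.List.sorted_pairwise b (fun x => x)
  have hcb : ∀ v : Int, (PySem.List.sorted b (fun x => x) false).count v = b.count v :=
    fun v => (PySem.List.sorted_perm b (fun x => x) false).count_eq v
  rw [countShift_eq 1 _ _ hpa hpb, countShift_eq (-1) _ _ hpa hpb, sub_eq_sum]
  have hmap : ∀ f : Int → Int,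
      ((PySem.List.sorted a (fun x => x) false).map f).sum = (a.map f).sum :=
    fun f => ((PySem.List.sorted_perm a (fun x => x) false).map f).sum_eq
  rw [hmap, hmap, ← PySem.List.sum_map_add_int]
  congr 1
  apply List.map_congr_left
  intro z _
  rw [hcb, hcb]
  have h1 : z - 1 = z + -1 := by omega
  have h2 : z - -1 = z + 1 := by omega
  rw [h1, h2]

-- B's stateful adjacent-pair loop computes A's indexed sum (over the SAME length-sorted list L)
lemma bfold_eq (L : List (List Int)) : ∀ (n : Nat),
    (PySem.List.pyRange 1 ((n : Int) + 1) 1).foldl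
      (fun (st : Int × List Int) j =>
        (st.1 + countShift 1 st.2 (PySem.List.sorted (PySem.List.pyGetD L j []) (fun x => x) false)
              + countShift (-1) st.2 (PySem.List.sorted (PySem.List.pyGetD L j []) (fun x => x) false),
         PySem.List.sorted (PySem.List.pyGetD L j []) (fun x => x) false))
      (0, PySem.List.sorted (PySem.List.pyGetD L 0 []) (fun x => x) false)
    = (((PySem.List.pyRange 0 (n : Int) 1).map (fun j =>
          substractLists (PySem.List.pyGetD L j []) (PySem.List.pyGetD L (j + 1) []))).sum,
       PySem.List.sorted (PySem.List.pyGetD L (n : Int) []) (fun x => x) false) := by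
  intro n
  induction n with
  | zero =>
    simp [PySem.List.pyRange_one_eq_nil]
  | succ m ih =>
    rw [show ((m + 1 : Nat) : Int) = (m : Int) + 1 by push_cast; ring]
    rw [PySem.List.pyRange_one_succ_right (by omega : (1 : Int) ≤ (m : Int) + 1),
        PySem.List.pyRange_one_succ_right (by omega : (0 : Int) ≤ (m : Int)),
        List.foldl_append, ih, List.map_append, List.sum_append]
    simp only [List.foldl_cons, List.foldl_nil, List.map_cons, List.map_nil, List.sum_cons,
      List.sum_nil]
    have hp := pair_merge_eq (PySem.List.pyGetD L (m : Int) []) (PySem.List.pyGetD L ((m : Int) + 1) [])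
    simp only [Prod.mk.injEq]
    refine ⟨?_, trivial⟩
    rw [← hp]
    ring

-- a loop of `new[k] += g j` over a nonempty list is one insert of the total
lemma foldl_modify_sum (k : String) (g : Int → Int) : ∀ (l : List Int) (d : PySem.Dict String Int),
    l.foldl (fun d j => d.modify k 0 (· + g j)) d
      = if l = [] then d else d.insert k (d.getD k 0 + (l.map g).sum) := by
  intro l
  induction l with
  | nil => simp
  | cons j t ih =>
    intro d
    simp only [List.foldl_cons, ih, List.map_cons, List.sum_cons]
    by_cases ht : t = []
    · simp [ht, PySem.Dict.modify]
    · simp only [ht, if_false]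
      simp [PySem.Dict.modify, PySem.Dict.getD_insert_self, PySem.Dict.insert_insert_self]
      ring_nf

lemma pyRange_nonpos (q : Int) (h : q ≤ 0) : PySem.List.pyRange 0 q 1 = [] :=
  PySem.List.pyRange_one_eq_nil h

-- per-entry total: A's indexed range sum equals B's stateful pair loop
lemma entry_sum (v : List (List Int)) (ql : Int) (h2 : 2 ≤ ql) :
    ((PySem.List.pyRange 0 (ql - 1) 1).map (fun j =>
        substractLists
          (PySem.List.pyGetD (PySem.List.sorted v (fun x => (x.length : Int)) false) j [])
          (PySem.List.pyGetD (PySem.List.sorted v (fun x => (x.length : Int)) false) (j + 1) []))).sum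
    = ((PySem.List.pyRange 1 ql 1).foldl
        (fun (st : Int × List Int) j =>
          (st.1 + countShift 1 st.2 (PySem.List.sorted (PySem.List.pyGetD (PySem.List.sorted v (fun x => (x.length : Int)) false) j []) (fun x => x) false)
                + countShift (-1) st.2 (PySem.List.sorted (PySem.List.pyGetD (PySem.List.sorted v (fun x => (x.length : Int)) false) j []) (fun x => x) false),
           PySem.List.sorted (PySem.List.pyGetD (PySem.List.sorted v (fun x => (x.length : Int)) false) j []) (fun x => x) false))
        (0, PySem.List.sorted (PySem.List.pyGetD (PySem.List.sorted v (fun x => (x.length : Int)) false) 0 []) (fun x => x) false)).1 := by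
  set L := PySem.List.sorted v (fun x => (x.length : Int)) false with hL
  set n : Nat := (ql - 1).toNat with hn
  have h1 : ql = (n : Int) + 1 := by omega
  rw [h1, show ((n : Int) + 1 - 1) = (n : Int) by ring, bfold_eq L n]

-- main loop: A's modify-loop over the keys equals B's insert-loop over the items (fresh keys)
lemma main_fold (ql : Int) :
    ∀ (l : List (String × List (List Int))) (acc : PySem.Dict String Int),
    (l.map Prod.fst).Nodup → (∀ p ∈ l, acc.contains p.1 = false) →
    l.foldl (fun acc p =>
        if ((p.2.length : Int)) < ql then acc
        else (PySem.List.pyRange 0 (ql - 1) 1).foldl (fun a j =>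
          a.modify p.1 0 (· + substractLists
            (PySem.List.pyGetD (PySem.List.sorted p.2 (fun x => (x.length : Int)) false) j [])
            (PySem.List.pyGetD (PySem.List.sorted p.2 (fun x => (x.length : Int)) false) (j + 1) []))) acc) acc
    = l.foldl (fun acc p =>
        if 2 ≤ ql ∧ ql ≤ (p.2.length : Int) then
          acc.insert p.1
            ((PySem.List.pyRange 1 ql 1).foldl
              (fun (st : Int × List Int) j =>
                (st.1 + countShift 1 st.2 (PySem.List.sorted (PySem.List.pyGetD (PySem.List.sorted p.2 (fun x => (x.length : Int)) false) j []) (fun x => x) false)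
                      + countShift (-1) st.2 (PySem.List.sorted (PySem.List.pyGetD (PySem.List.sorted p.2 (fun x => (x.length : Int)) false) j []) (fun x => x) false),
                 PySem.List.sorted (PySem.List.pyGetD (PySem.List.sorted p.2 (fun x => (x.length : Int)) false) j []) (fun x => x) false))
              (0, PySem.List.sorted (PySem.List.pyGetD (PySem.List.sorted p.2 (fun x => (x.length : Int)) false) 0 []) (fun x => x) false)).1
        else acc) acc := by
  intro l
  induction l with
  | nil => intro acc _ _; rfl
  | cons p t ih =>
    intro acc hnd hfresh
    simp only [List.foldl_cons]
    by_cases hlen : ((p.2.length : Int)) < ql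
    · rw [if_pos hlen, if_neg (by rintro ⟨-, h2⟩; omega)]
      exact ih acc (by simpa using hnd.of_cons) (fun q hq => hfresh q (List.mem_cons_of_mem _ hq))
    · by_cases hq2 : 2 ≤ ql
      · rw [if_neg hlen, if_pos ⟨hq2, by omega⟩]
        have hne : PySem.List.pyRange 0 (ql - 1) 1 ≠ [] := by
          rw [show ql - 1 = (((ql - 1).toNat : Nat) : Int) by omega, PySem.List.pyRange_zero_natCast]
          simp [List.range_eq_nil]
          omega
        rw [foldl_modify_sum, if_neg hne,
            PySem.Dict.getD_of_not_contains acc 0 (hfresh p (List.mem_cons_self)), zero_add,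
            entry_sum p.2 ql hq2]
        apply ih
        · simpa using hnd.of_cons
        · intro q hq
          rw [PySem.Dict.contains_insert]
          have hne' : q.1 ≠ p.1 := by
            intro h
            have := hnd
            simp only [List.map_cons, List.nodup_cons] at this
            exact this.1 (h ▸ List.mem_map_of_mem hq)
          simp [hne', hfresh q (List.mem_cons_of_mem _ hq)]
      · rw [if_neg hlen, if_neg (by rintro ⟨h1, -⟩; omega)]
        have hr : PySem.List.pyRange 0 (ql - 1) 1 = [] := pyRange_nonpos _ (by omega)
        have hstep : (PySem.List.pyRange 0 (ql - 1) 1).foldl (fun a j =>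
            a.modify p.1 0 (· + substractLists
              (PySem.List.pyGetD (PySem.List.sorted p.2 (fun x => (x.length : Int)) false) j [])
              (PySem.List.pyGetD (PySem.List.sorted p.2 (fun x => (x.length : Int)) false) (j + 1) []))) acc = acc := by
          rw [hr]
          rfl
        rw [hstep]
        exact ih acc (by simpa using hnd.of_cons) (fun q hq => hfresh q (List.mem_cons_of_mem _ hq))

-- ===== VERDICT (by name: the statement is the Claim_ definition above) =====
theorem cal_position_spec : Claim_equal_cal_position := by
  intro pd ql _
  unfold Spec_cal_position cal_position cal_position_alt
  simp only []
  have hnd : ((PySem.Dict.ofList pd).items.map Prod.fst).Nodup := by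
    have := PySem.Dict.nodup_keys_ofList pd
    simpa [PySem.Dict.keys] using this
  have hkeys : (PySem.Dict.ofList pd).keys = (PySem.Dict.ofList pd).items.map Prod.fst := rfl
  rw [hkeys, List.foldl_map]
  congr 1
  rw [PySem.List.foldl_congr_mem _ _
    (fun acc p =>
      if ((p.2.length : Int)) < ql then acc
      else (PySem.List.pyRange 0 (ql - 1) 1).foldl (fun a j =>
        a.modify p.1 0 (· + substractLists
          (PySem.List.pyGetD (PySem.List.sorted p.2 (fun x => (x.length : Int)) false) j [])
          (PySem.List.pyGetD (PySem.List.sorted p.2 (fun x => (x.length : Int)) false) (j + 1) []))) acc)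
    _ ?_]
  · exact main_fold ql _ _ hnd (by intro q hq'; rfl)
  · intro acc p hp
    have hd : (PySem.Dict.ofList pd).getD p.1 [] = p.2 := by
      apply PySem.Dict.getD_of_mem_items
      · simpa using hp
      · exact PySem.Dict.nodup_keys_ofList pd
    rw [hd]
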